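-- pv_equiv track=rewrite | github.com/LeoMSgit/Projetos_Pessoais | Fundação Estudar/Programa de Bolsas Líderes Estudar 2025/Questão Difícil - Maneiras pintar grade N x 3/Maneiras pintar grade N x 3.py | contar_maneiras_pintar
-- ===== SOURCE A (Python) =====
-- def contar_maneiras_pintar(n):
--     MOD = 10**9 + 7
--
--     # Casos base
--     A = 6
--     B = 6
--
--     for _ in range(2, n + 1):
--         novo_A = (2 * A + 2 * B) % MOD
--         novo_B = (2 * A + 3 * B) % MOD
--         A, B = novo_A, novo_B
--
--     return (A + B) % MOD
-- ===== SOURCE B (Python) =====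
-- def contar_maneiras_pintar(n):
--     MOD = 10**9 + 7
--
--     def mat_mul(X, Y):
--         a, b, c, d = X
--         e, f, g, h = Y
--         return ((a * e + b * g) % MOD, (a * f + b * h) % MOD,
--                 (c * e + d * g) % MOD, (c * f + d * h) % MOD)
--
--     def mat_pow(M, e):
--         if e == 0:
--             return (1, 0, 0, 1)
--         H = mat_pow(M, e // 2)
--         H2 = mat_mul(H, H)
--         return mat_mul(H2, M) if e % 2 == 1 else H2
--
--     e = n - 1 if n > 1 else 0
--     a, b, c, d = mat_pow((2, 2, 2, 3), e)
--     return (6 * (a + b) + 6 * (c + d)) % MOD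
-- ===== Notes on version B (the rewrite author's own statement) =====
-- stated objective: faster
-- what changed: Replaces the O(n) linear iteration of the (A,B) recurrence by binary exponentiation of the 2x2 transition matrix [[2,2],[2,3]] applied to the base vector (6,6).
import Mathlib
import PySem

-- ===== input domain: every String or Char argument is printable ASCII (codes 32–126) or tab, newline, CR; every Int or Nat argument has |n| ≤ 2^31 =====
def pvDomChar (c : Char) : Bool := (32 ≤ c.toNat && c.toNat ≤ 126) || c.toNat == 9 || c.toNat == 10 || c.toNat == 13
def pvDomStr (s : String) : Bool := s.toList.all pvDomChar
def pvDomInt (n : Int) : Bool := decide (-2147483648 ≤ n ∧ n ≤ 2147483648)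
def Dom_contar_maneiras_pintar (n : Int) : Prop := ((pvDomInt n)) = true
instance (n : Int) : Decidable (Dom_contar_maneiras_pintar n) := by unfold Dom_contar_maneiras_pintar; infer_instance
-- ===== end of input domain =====

-- ===== PORT A =====
-- B replaces A's O(n) iteration by binary exponentiation of the 2x2 transition matrix (O(log n)).
-- '%' below is exact for Python's '%' because the modulus 1000000007 is positive.
def contar_maneiras_pintar (n : Int) : Int :=
  let MOD : Int := 1000000007
  let s := (PySem.List.pyRange 2 (n + 1) 1).foldl
    (fun (AB : Int × Int) _ =>
      ((2 * AB.1 + 2 * AB.2) % MOD, (2 * AB.1 + 3 * AB.2) % MOD)) (6, 6)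
  (s.1 + s.2) % MOD

-- ===== PORT B =====
def pvMatMul (X Y : Int × Int × Int × Int) : Int × Int × Int × Int :=
  let MOD : Int := 1000000007
  ((X.1 * Y.1 + X.2.1 * Y.2.2.1) % MOD, (X.1 * Y.2.1 + X.2.1 * Y.2.2.2) % MOD,
   (X.2.2.1 * Y.1 + X.2.2.2 * Y.2.2.1) % MOD, (X.2.2.1 * Y.2.1 + X.2.2.2 * Y.2.2.2) % MOD)

def pvMatPow (M : Int × Int × Int × Int) (e : Nat) : Int × Int × Int × Int :=
  if h : e = 0 then (1, 0, 0, 1)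
  else
    let H := pvMatPow M (e / 2)
    let H2 := pvMatMul H H
    if e % 2 = 1 then pvMatMul H2 M else H2
decreasing_by exact Nat.div_lt_self (Nat.pos_of_ne_zero h) (by omega)

-- exponent e = n-1 if n>1 else 0 is nonnegative by construction, so .toNat is exact
def contar_maneiras_pintar_alt (n : Int) : Int :=
  let e : Int := if 1 < n then n - 1 else 0
  let M := pvMatPow (2, 2, 2, 3) e.toNat
  (6 * (M.1 + M.2.1) + 6 * (M.2.2.1 + M.2.2.2)) % 1000000007

-- ===== PRECONDITION & SPEC =====
def Spec_contar_maneiras_pintar (n : Int) (out : Int) : Prop := out = contar_maneiras_pintar_alt n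
instance (n : Int) (out : Int) : Decidable (Spec_contar_maneiras_pintar n out) := by unfold Spec_contar_maneiras_pintar; infer_instance

-- ===== CLAIM (what is proved, stated in full; the proofs are below) =====
def Claim_equal_contar_maneiras_pintar : Prop := ∀ (n : Int), Dom_contar_maneiras_pintar n → Spec_contar_maneiras_pintar n (contar_maneiras_pintar n)

-- ===== LEMMAS AND PROOFS =====

-- proof-only helpers: everything is interpreted in ZMod 1000000007
def pvT (M : Int × Int × Int × Int) : Matrix (Fin 2) (Fin 2) (ZMod 1000000007) :=
  Matrix.of ![![(M.1 : ZMod 1000000007), (M.2.1 : ZMod 1000000007)],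
              ![(M.2.2.1 : ZMod 1000000007), (M.2.2.2 : ZMod 1000000007)]]

def pvStepI (AB : Int × Int) : Int × Int :=
  ((2 * AB.1 + 2 * AB.2) % 1000000007, (2 * AB.1 + 3 * AB.2) % 1000000007)

def pvStepZ (v : ZMod 1000000007 × ZMod 1000000007) : ZMod 1000000007 × ZMod 1000000007 :=
  (2 * v.1 + 2 * v.2, 2 * v.1 + 3 * v.2)

theorem pv_cast_emod (x : Int) :
    ((x % 1000000007 : Int) : ZMod 1000000007) = (x : ZMod 1000000007) := by
  have h0 : ((1000000007 : Int) : ZMod 1000000007) = 0 := by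
    exact_mod_cast ZMod.natCast_self 1000000007
  rw [Int.emod_def]
  push_cast at h0 ⊢
  rw [h0]
  ring

theorem pv_cast_eq_emod_eq {x y : Int}
    (h : (x : ZMod 1000000007) = (y : ZMod 1000000007)) :
    x % 1000000007 = y % 1000000007 := by
  have := (ZMod.intCast_eq_intCast_iff x y 1000000007).mp h
  simpa [Int.ModEq] using this

theorem pv_foldl_const {α β : Type} (f : β → β) (l : List α) (init : β) :
    l.foldl (fun s _ => f s) init = f^[l.length] init := by
  induction l generalizing init with
  | nil => rfl
  | cons a t ih => simp [List.foldl, ih, Function.iterate_succ_apply]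

theorem pv_cast_step (AB : Int × Int) :
    (((pvStepI AB).1 : ZMod 1000000007), ((pvStepI AB).2 : ZMod 1000000007)) =
      pvStepZ ((AB.1 : ZMod 1000000007), (AB.2 : ZMod 1000000007)) := by
  simp [pvStepI, pvStepZ, pv_cast_emod]

theorem pv_cast_iter (k : Nat) (AB : Int × Int) :
    (((pvStepI^[k] AB).1 : ZMod 1000000007), ((pvStepI^[k] AB).2 : ZMod 1000000007)) =
      pvStepZ^[k] ((AB.1 : ZMod 1000000007), (AB.2 : ZMod 1000000007)) := by
  induction k generalizing AB with
  | zero => rfl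
  | succ k ih =>
      rw [Function.iterate_succ_apply, Function.iterate_succ_apply, ih, pv_cast_step]

theorem pv_T_mul (X Y : Int × Int × Int × Int) :
    pvT (pvMatMul X Y) = pvT X * pvT Y := by
  ext i j
  fin_cases i <;> fin_cases j <;>
    simp [pvT, pvMatMul, Matrix.mul_apply, Fin.sum_univ_two, pv_cast_emod]

theorem pv_T_pow (M : Int × Int × Int × Int) (e : Nat) :
    pvT (pvMatPow M e) = (pvT M) ^ e := by
  induction e using Nat.strong_induction_on with
  | _ e ih =>
    rw [pvMatPow]
    by_cases h : e = 0
    · subst h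
      simp only [dif_pos]
      ext i j
      fin_cases i <;> fin_cases j <;> simp [pvT]
    · have hlt : e / 2 < e := Nat.div_lt_self (Nat.pos_of_ne_zero h) (by omega)
      simp only [dif_neg h]
      have hH := ih (e / 2) hlt
      by_cases hp : e % 2 = 1
      · simp only [if_pos hp, pv_T_mul, hH, ← pow_add, ← pow_succ]
        congr 1
        omega
      · simp only [if_neg hp, pv_T_mul, hH, ← pow_add]
        congr 1
        omega

theorem pv_iter_pow (k : Nat) :
    pvStepZ^[k] (6, 6) =
      (((pvT (2, 2, 2, 3)) ^ k) 0 0 * 6 + ((pvT (2, 2, 2, 3)) ^ k) 0 1 * 6,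
       ((pvT (2, 2, 2, 3)) ^ k) 1 0 * 6 + ((pvT (2, 2, 2, 3)) ^ k) 1 1 * 6) := by
  induction k with
  | zero => simp [pvT]
  | succ k ih =>
      rw [Function.iterate_succ_apply', ih, pow_succ']
      simp [pvStepZ, pvT, Matrix.mul_apply, Fin.sum_univ_two]
      constructor <;> ring

theorem pv_exp_eq (n : Int) :
    (n + 1 - 2).toNat = (if 1 < n then n - 1 else 0).toNat := by
  split <;> omega

-- ===== VERDICT (by name: the statement is the Claim_ definition above) =====
theorem contar_maneiras_pintar_spec : Claim_equal_contar_maneiras_pintar := by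
  intro n _
  unfold Spec_contar_maneiras_pintar contar_maneiras_pintar contar_maneiras_pintar_alt
  apply pv_cast_eq_emod_eq
  have hfold :
      (PySem.List.pyRange 2 (n + 1) 1).foldl
        (fun (AB : Int × Int) _ =>
          ((2 * AB.1 + 2 * AB.2) % 1000000007, (2 * AB.1 + 3 * AB.2) % 1000000007)) (6, 6)
        = pvStepI^[(n + 1 - 2).toNat] (6, 6) :=
    (pv_foldl_const pvStepI _ _).trans (by rw [PySem.List.length_pyRange_one])
  rw [hfold, pv_exp_eq]
  set k := (if 1 < n then n - 1 else 0).toNat with hk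
  have hA := pv_cast_iter k (6, 6)
  norm_num at hA
  rw [pv_iter_pow k, Prod.mk.injEq] at hA
  obtain ⟨h1, h2⟩ := hA
  have hB := pv_T_pow (2, 2, 2, 3) k
  have e00 : ((pvMatPow (2, 2, 2, 3) k).1 : ZMod 1000000007) = ((pvT (2, 2, 2, 3)) ^ k) 0 0 := by
    rw [← hB]; rfl
  have e01 : ((pvMatPow (2, 2, 2, 3) k).2.1 : ZMod 1000000007) = ((pvT (2, 2, 2, 3)) ^ k) 0 1 := by
    rw [← hB]; rfl
  have e10 : ((pvMatPow (2, 2, 2, 3) k).2.2.1 : ZMod 1000000007) = ((pvT (2, 2, 2, 3)) ^ k) 1 0 := by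
    rw [← hB]; rfl
  have e11 : ((pvMatPow (2, 2, 2, 3) k).2.2.2 : ZMod 1000000007) = ((pvT (2, 2, 2, 3)) ^ k) 1 1 := by
    rw [← hB]; rfl
  push_cast
  rw [h1, h2, e00, e01, e10, e11]
  ring
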